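-- pv_equiv track=rewrite | github.com/offlineAu/Sentisphere | backend-dashboard/app/services/insight_generation_service.py | _sentiment_counts
-- ===== SOURCE A (Python) =====
-- from collections import Counter, defaultdict
-- from typing import Any, Dict, List, Optional, Tuple
--
-- def _sentiment_counts(items: List[str]) -> Dict[str, int]:
--     # Normalize sentiments: treat strongly_negative as negative
--     normalized = []
--     for s in items:
--         s_lower = str(s).lower()
--         if s_lower == "strongly_negative":
--             normalized.append("negative")
--         elif s_lower in ("positive", "neutral", "negative"):
--             normalized.append(s_lower)
--
--     c = Counter(normalized)
--     return {"positive": c.get("positive", 0), "neutral": c.get("neutral", 0), "negative": c.get("negative", 0)}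
-- ===== SOURCE B (Python) =====
-- def _sentiment_counts(items):
--     return {
--         "positive": sum(1 for s in items if str(s).lower() == "positive"),
--         "neutral": sum(1 for s in items if str(s).lower() == "neutral"),
--         "negative": sum(1 for s in items if str(s).lower() in ("negative", "strongly_negative")),
--     }
-- ===== Notes on version B (the rewrite author's own statement) =====
-- stated objective: simpler
-- what changed: Drops the intermediate normalized list and the Counter: the result dict is built directly from three independent category-filtering counts over items (strongly_negative folded into negative).
import Mathlib
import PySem

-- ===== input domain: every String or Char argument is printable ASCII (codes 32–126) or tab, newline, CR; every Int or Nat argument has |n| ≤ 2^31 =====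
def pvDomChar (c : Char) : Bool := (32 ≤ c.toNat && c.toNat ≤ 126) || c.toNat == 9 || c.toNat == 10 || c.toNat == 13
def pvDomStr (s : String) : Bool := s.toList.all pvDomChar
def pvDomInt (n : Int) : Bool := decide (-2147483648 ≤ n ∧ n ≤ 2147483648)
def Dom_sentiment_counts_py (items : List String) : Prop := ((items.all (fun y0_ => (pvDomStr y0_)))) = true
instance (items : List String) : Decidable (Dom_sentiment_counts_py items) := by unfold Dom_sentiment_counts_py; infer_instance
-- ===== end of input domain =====

-- B drops A's intermediate normalized list and Counter and builds the result dict directly from three category-filtering counts (simpler decomposition, not faster).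
-- ===== PORT A =====
def sentiment_counts_py (items : List String) : List (String × Int) :=
  let normalized := items.foldl (fun acc s =>
    let s_lower := PySem.Str.lower s
    if s_lower == "strongly_negative" then acc ++ ["negative"]
    else if s_lower == "positive" || s_lower == "neutral" || s_lower == "negative" then acc ++ [s_lower]
    else acc) []
  let c := PySem.Dict.counter normalized
  [("positive", c.getD "positive" 0), ("neutral", c.getD "neutral" 0), ("negative", c.getD "negative" 0)]

-- ===== PORT B =====
def sentiment_counts_py_alt (items : List String) : List (String × Int) :=
  [("positive", (items.countP (fun s => PySem.Str.lower s == "positive") : Int)),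
   ("neutral", (items.countP (fun s => PySem.Str.lower s == "neutral") : Int)),
   ("negative", (items.countP (fun s => PySem.Str.lower s == "negative" || PySem.Str.lower s == "strongly_negative") : Int))]

-- ===== PRECONDITION & SPEC =====
def Spec_sentiment_counts_py (items : List String) (out : List (String × Int)) : Prop := out = sentiment_counts_py_alt items
instance (items : List String) (out : List (String × Int)) : Decidable (Spec_sentiment_counts_py items out) := by unfold Spec_sentiment_counts_py; infer_instance

-- ===== CLAIM (what is proved, stated in full; the proofs are below) =====
def Claim_equal_sentiment_counts_py : Prop := ∀ (items : List String), Dom_sentiment_counts_py items → Spec_sentiment_counts_py items (sentiment_counts_py items)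

-- ===== LEMMAS AND PROOFS =====

-- ===== VERDICT (by name: the statement is the Claim_ definition above) =====
-- the per-string contribution of A's normalization loop
def pvNorm (s : String) : List String :=
  let l := PySem.Str.lower s
  if l == "strongly_negative" then ["negative"]
  else if l == "positive" || l == "neutral" || l == "negative" then [l]
  else []

theorem norm_eq_flatMap (items : List String) :
    (items.foldl (fun acc s =>
      let s_lower := PySem.Str.lower s
      if s_lower == "strongly_negative" then acc ++ ["negative"]
      else if s_lower == "positive" || s_lower == "neutral" || s_lower == "negative" then acc ++ [s_lower]
      else acc) []) = items.flatMap pvNorm := by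
  have h : ∀ (items : List String) (a : List String),
      (items.foldl (fun acc s =>
        let s_lower := PySem.Str.lower s
        if s_lower == "strongly_negative" then acc ++ ["negative"]
        else if s_lower == "positive" || s_lower == "neutral" || s_lower == "negative" then acc ++ [s_lower]
        else acc) a) = a ++ items.flatMap pvNorm := by
    intro items
    induction items with
    | nil => simp
    | cons x xs ih =>
      intro a
      simp only [List.foldl_cons, List.flatMap_cons]
      rw [ih]
      simp only [pvNorm]
      split_ifs <;> simp
  simpa using h items []

theorem count_norm (items : List String) (v : String) (_hv : pvNorm v = [v]) :
    (items.flatMap pvNorm).count v = items.countP (fun s => pvNorm s == [v]) := by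
  induction items with
  | nil => simp
  | cons x xs ih =>
    simp only [List.flatMap_cons, List.count_append, List.countP_cons, ih]
    have hx : pvNorm x = [] ∨ ∃ w, pvNorm x = [w] := by
      unfold pvNorm; dsimp only; split_ifs <;> simp
    by_cases h : pvNorm x = [v]
    · simp [h]; omega
    · rcases hx with h0 | ⟨w, hw⟩
      · simp [h0]
      · have hwv : w ≠ v := fun e => h (by rw [hw, e])
        simp [hw, hwv]

theorem sentiment_counts_py_spec : Claim_equal_sentiment_counts_py := by
  intro items _
  unfold Spec_sentiment_counts_py sentiment_counts_py sentiment_counts_py_alt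
  simp only [norm_eq_flatMap, PySem.Dict.getD_counter]
  have key : ∀ (v : String), v = "positive" ∨ v = "neutral" →
      (items.flatMap pvNorm).count v = items.countP (fun s => PySem.Str.lower s == v) := by
    intro v hv
    rw [count_norm items v (by rcases hv with h | h <;> subst h <;> decide)]
    apply List.countP_congr
    intro s _
    rcases hv with h | h <;> subst h <;>
      · simp only [pvNorm]
        split_ifs with h1 h2 <;> simp_all
  have keyn : (items.flatMap pvNorm).count "negative" =
      items.countP (fun s => PySem.Str.lower s == "negative" || PySem.Str.lower s == "strongly_negative") := by
    rw [count_norm items "negative" (by decide)]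
    apply List.countP_congr
    intro s _
    simp only [pvNorm]
    split_ifs with h1 h2 <;> simp_all
  rw [key "positive" (Or.inl rfl), key "neutral" (Or.inr rfl), keyn]
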